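-- pv_equiv track=rewrite | github.com/nguyenlinhlinh/adventofcode-2024 | 12/solution2.py | findVerticalSides
-- ===== SOURCE A (Python) =====
-- def findVerticalSides(perimeter):
--     verticalMap = {}
--     sides = []
--     for i in range(len(perimeter)):
--         (r, c) = perimeter[i]
--         if c in verticalMap:
--             verticalMap[c].append(r)
--         else:
--             verticalMap[c] = [r]
--
--     for c, array in verticalMap.items():
--         array.sort()
--         curr = 0
--         for i in range(len(array)):
--             if i == len(array) - 1 or array[i + 1] - array[i] != 1 :
--                 if (i + 1 - curr) > 1:
--                     sides.append([(r, c) for r in array[curr: i + 1]])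
--                 curr = i + 1
--     return sides
-- ===== SOURCE B (Python) =====
-- def findVerticalSides(perimeter):
--     # rank each column by first occurrence (matches dict insertion order)
--     order = {}
--     for r, c in perimeter:
--         if c not in order:
--             order[c] = len(order)
--     # one global sort, then one linear scan emitting maximal step-1 runs
--     sides = []
--     run = []
--     for r, c in sorted(perimeter, key=lambda p: (order[p[1]], p[0])):
--         if run and run[-1][1] == c and r - run[-1][0] == 1:
--             run.append((r, c))
--         else:
--             if len(run) > 1:
--                 sides.append(run)
--             run = [(r, c)]
--     if len(run) > 1:
--         sides.append(run)
--     return sides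
-- ===== Notes on version B (the rewrite author's own statement) =====
-- stated objective: alternative
-- what changed: Replaces A's per-column dict-of-row-lists, per-column sorts and index/curr boundary loops by a column-rank dict, ONE global sort of all points keyed by (column-first-occurrence rank, row) and a single linear scan that emits maximal step-1 runs at column-change or gap boundaries.
import Mathlib
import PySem

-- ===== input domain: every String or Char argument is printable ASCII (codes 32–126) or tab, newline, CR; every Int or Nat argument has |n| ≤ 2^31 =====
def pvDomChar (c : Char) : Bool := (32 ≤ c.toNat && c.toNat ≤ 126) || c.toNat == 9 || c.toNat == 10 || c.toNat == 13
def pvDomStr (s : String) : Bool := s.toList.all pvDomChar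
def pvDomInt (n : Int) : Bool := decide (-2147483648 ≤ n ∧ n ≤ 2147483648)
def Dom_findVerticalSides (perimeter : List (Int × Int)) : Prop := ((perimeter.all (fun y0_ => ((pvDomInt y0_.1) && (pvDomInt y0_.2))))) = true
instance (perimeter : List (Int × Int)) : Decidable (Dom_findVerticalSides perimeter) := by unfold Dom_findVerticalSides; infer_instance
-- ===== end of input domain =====

-- B replaces A's per-column dict-of-row-lists with per-column sorts and index/curr
-- boundary loops by one global sort keyed by (column-first-occurrence rank, row)
-- followed by a single linear scan; objective: alternative (same asymptotic cost).

-- ===== PORT A =====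
-- one step of A's inner 'for i in range(len(array))' loop; state = (sides, curr)
def vsStepA (array : List Int) (c : Int) (st : List (List (Int × Int)) × Int) (i : Int) :
    List (List (Int × Int)) × Int :=
  if i == (array.length : Int) - 1
      || PySem.List.pyGetD array (i + 1) 0 - PySem.List.pyGetD array i 0 != 1 then
    -- array[i+1] is only reached by Python when i ≠ len-1, so the pyGetD default is never the value used
    (if i + 1 - st.2 > 1 then
        st.1 ++ [(PySem.List.slice array (some st.2) (some (i + 1))).map (fun r => (r, c))]
      else st.1,
     i + 1)
  else st

def findVerticalSides (perimeter : List (Int × Int)) : List (List (Int × Int)) :=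
  let verticalMap := perimeter.foldl
    (fun d (p : Int × Int) =>
      if d.contains p.2 then d.modify p.2 [] (fun a => a ++ [p.1])
      else d.insert p.2 [p.1])
    PySem.Dict.empty
  verticalMap.items.foldl
    (fun sides cv =>
      let array := PySem.List.sorted cv.2 (fun x => x) false
      ((PySem.List.pyRange 0 (array.length : Int) 1).foldl (vsStepA array cv.1)
        (sides, 0)).1)
    []

-- ===== PORT B =====
-- one step of B's single scan; state = (sides, run)
def bStep (st : List (List (Int × Int)) × List (Int × Int)) (pt : Int × Int) :
    List (List (Int × Int)) × List (Int × Int) :=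
  if !st.2.isEmpty && (st.2.getLastD (0, 0)).2 == pt.2
      && pt.1 - (st.2.getLastD (0, 0)).1 == 1 then
    (st.1, st.2 ++ [pt])
  else
    ((if st.2.length > 1 then st.1 ++ [st.2] else st.1), [pt])

def findVerticalSides_alt (perimeter : List (Int × Int)) : List (List (Int × Int)) :=
  let order := perimeter.foldl
    (fun o (p : Int × Int) =>
      if o.contains p.2 then o else o.insert p.2 (o.items.length : Int))
    PySem.Dict.empty
  -- key (order[p[1]], p[0]); every column is a key of 'order', so the getD default is never used
  let pts := PySem.List.sorted2 perimeter
    (fun p => order.getD p.2 0) (fun p => p.1) false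
  let st := pts.foldl bStep ([], [])
  if st.2.length > 1 then st.1 ++ [st.2] else st.1

-- ===== PRECONDITION & SPEC =====
def Spec_findVerticalSides (perimeter : List (Int × Int)) (out : List (List (Int × Int))) : Prop := out = findVerticalSides_alt perimeter
instance (perimeter : List (Int × Int)) (out : List (List (Int × Int))) : Decidable (Spec_findVerticalSides perimeter out) := by unfold Spec_findVerticalSides; infer_instance

-- ===== CLAIM (what is proved, stated in full; the proofs are below) =====
def Claim_equal_findVerticalSides : Prop := ∀ (perimeter : List (Int × Int)), Dom_findVerticalSides perimeter → Spec_findVerticalSides perimeter (findVerticalSides perimeter)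

-- ===== LEMMAS AND PROOFS =====

-- named copies of the two dict-building steps (defeq to the lambdas in the ports)
def mStep (d : PySem.Dict Int (List Int)) (p : Int × Int) : PySem.Dict Int (List Int) :=
  d.modify p.2 [] (fun a => a ++ [p.1])

def oStep (o : PySem.Dict Int Int) (p : Int × Int) : PySem.Dict Int Int :=
  if o.contains p.2 then o else o.insert p.2 (o.items.length : Int)

def srt (v : List Int) : List Int := PySem.List.sorted v (fun x => x) false

-- 'if len(run) > 1: sides.append([(r, c) for r in run])' on an Int run
def keepStep (c : Int) (sides : List (List (Int × Int))) (run : List Int) :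
    List (List (Int × Int)) :=
  if run.length > 1 then sides ++ [run.map (fun r => (r, c))] else sides

-- reference run-splitter: structural recursion from the right
def rStep (x : Int) (gs : List (List Int)) : List (List Int) :=
  match gs with
  | [] => [[x]]
  | g :: gs => if g.headD 0 - x == 1 then (x :: g) :: gs else [x] :: g :: gs

def rRuns (s : List Int) : List (List Int) := s.foldr rStep []

-- canonical per-column step both ports are reduced to
def canonStep (s : List (List (Int × Int))) (cv : Int × List Int) : List (List (Int × Int)) :=
  (rRuns (srt cv.2)).foldl (keepStep cv.1) s

def blockOf (cv : Int × List Int) : List (Int × Int) :=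
  (srt cv.2).map (fun r => (r, cv.1))

def blocks (L : List (Int × List Int)) : List (Int × Int) := L.flatMap blockOf

def flatten (L : List (Int × List Int)) : List (Int × Int) :=
  L.flatMap (fun cv => cv.2.map (fun r => (r, cv.1)))

-- the enumeration dict 'order' as a list: keys paired with their indices from n on
def en : Nat → List Int → List (Int × Int)
  | _, [] => []
  | n, k :: ks => (k, (n : Int)) :: en (n + 1) ks

-- lexicographic ≤ on the sort key
def lexLe (k1 k2 : (Int × Int) → Int) (a b : Int × Int) : Prop :=
  k1 a < k1 b ∨ (k1 a = k1 b ∧ k2 a ≤ k2 b)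

-- glue a pending prefix onto the first run unconditionally (A's viewpoint)
def attachRun (p : List Int) : List (List Int) → List (List Int)
  | [] => []
  | g :: gs => (p ++ g) :: gs

-- glue the current run only when it actually continues into the first run (B's viewpoint)
def attachGlue (cur : List Int) : List (List Int) → List (List Int)
  | [] => if cur.isEmpty then [] else [cur]
  | g :: gs =>
      if !cur.isEmpty && (g.headD 0 - cur.getLastD 0 == 1) then (cur ++ g) :: gs
      else (if cur.isEmpty then [] else [cur]) ++ g :: gs

lemma attachRun_nil (gs : List (List Int)) : attachRun [] gs = gs := by
  cases gs <;> simp [attachRun]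

lemma rStep_head (x : Int) (gs : List (List Int)) :
    ∃ t gs', rStep x gs = (x :: t) :: gs' := by
  cases gs with
  | nil => exact ⟨[], [], rfl⟩
  | cons g gs =>
    by_cases h : g.head?.getD 0 - x = 1
    · exact ⟨g, gs, by simp [rStep, h]⟩
    · exact ⟨[], g :: gs, by simp [rStep, h]⟩

lemma attachGlue_single (x : Int) (gs : List (List Int)) :
    attachGlue [x] gs = rStep x gs := by
  cases gs with
  | nil => rfl
  | cons g gs => by_cases h : g.head?.getD 0 - x = 1 <;> simp [attachGlue, rStep, h]

lemma attachGlue_glue (cur : List Int) (x : Int) (gs : List (List Int))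
    (hne : cur.isEmpty = false) (hg : x - cur.getLast?.getD 0 = 1) :
    attachGlue (cur ++ [x]) gs = attachGlue cur (rStep x gs) := by
  cases gs with
  | nil => simp [attachGlue, rStep, hne, hg]
  | cons g gs =>
    by_cases h : g.head?.getD 0 - x = 1 <;>
      simp [attachGlue, rStep, h, hne, hg, List.append_assoc]

lemma attachGlue_noglue (cur : List Int) (x : Int) (gs : List (List Int))
    (hne : cur.isEmpty = false) (hg : ¬ x - cur.getLast?.getD 0 = 1) :
    attachGlue cur (rStep x gs) = cur :: rStep x gs := by
  obtain ⟨t, gs', h⟩ := rStep_head x gs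
  rw [h]
  simp [attachGlue, hne, hg]

-- ---------- A side: the index loop computes the keep-fold over rRuns ----------
lemma A_loop (c : Int) (a : List Int) :
    ∀ (m k curr : Nat) (sides : List (List (Int × Int))),
      a.length - k ≤ m → curr ≤ k → k ≤ a.length →
      ((PySem.List.pyRange (k : Int) (a.length : Int) 1).foldl (vsStepA a c)
          (sides, (curr : Int))).1
        = (attachRun ((a.drop curr).take (k - curr)) (rRuns (a.drop k))).foldl
            (keepStep c) sides := by
  intro m
  induction m with
  | zero =>
    intro k curr sides h1 h2 h3
    have hk : k = a.length := by omega
    subst hk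
    rw [PySem.List.pyRange_one_eq_nil (le_refl _)]
    simp [rRuns, attachRun]
  | succ m ih =>
    intro k curr sides h1 h2 h3
    by_cases hk : k = a.length
    · subst hk
      rw [PySem.List.pyRange_one_eq_nil (le_refl _)]
      simp [rRuns, attachRun]
    · have hlt : k < a.length := by omega
      have hltI : (k : Int) < (a.length : Int) := by exact_mod_cast hlt
      rw [PySem.List.pyRange_one_cons hltI, List.foldl_cons]
      have hxk : PySem.List.pyGetD a (k : Int) 0 = a[k] := by
        rw [PySem.List.pyGetD_natCast]; exact List.getD_eq_getElem a 0 hlt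
      have hcast1 : ((k : Int) + 1) = (((k + 1 : Nat)) : Int) := by push_cast; ring
      have hdrop : a.drop k = a[k] :: a.drop (k + 1) := List.drop_eq_getElem_cons hlt
      have hptake : (a.drop curr).take (k + 1 - curr)
          = (a.drop curr).take (k - curr) ++ [a[k]] := by
        have h1' : k + 1 - curr = (k - curr) + 1 := by omega
        rw [h1', List.take_add_one]
        congr 1
        rw [List.getElem?_drop]
        have hck : curr + (k - curr) = k := by omega
        rw [hck, List.getElem?_eq_getElem hlt]
        rfl
      have hplen : ((a.drop curr).take (k - curr)).length = k - curr := by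
        simp [List.length_take, List.length_drop]; omega
      have hslice : PySem.List.slice a (some (curr : Int)) (some ((k : Int) + 1))
          = (a.drop curr).take (k - curr) ++ [a[k]] := by
        rw [hcast1, PySem.List.slice_natCast, hptake]
      have hemit : (if (k : Int) + 1 - (curr : Int) > 1 then
            sides ++ [(PySem.List.slice a (some (curr : Int)) (some ((k : Int) + 1))).map
              (fun r => (r, c))]
          else sides)
          = keepStep c sides ((a.drop curr).take (k - curr) ++ [a[k]]) := by
        rw [hslice]
        unfold keepStep
        have hlen2 : ((a.drop curr).take (k - curr) ++ [a[k]]).length = (k - curr) + 1 := by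
          simp [hplen]
        rw [hlen2]
        split_ifs with hA hB hB
        · rfl
        · exfalso; omega
        · exfalso; omega
        · rfl
      by_cases hk1 : k + 1 = a.length
      · -- last index: the i == len-1 test fires
        have hc1 : ((k : Int) == (a.length : Int) - 1) = true := by
          simp only [beq_iff_eq]; omega
        have hstep : vsStepA a c (sides, (curr : Int)) (k : Int)
            = (keepStep c sides ((a.drop curr).take (k - curr) ++ [a[k]]), (k : Int) + 1) := by
          unfold vsStepA
          rw [hc1, Bool.true_or, if_pos rfl, ← hemit]
        rw [hstep, hcast1]
        rw [ih (k + 1) (k + 1) _ (by omega) (le_refl _) (by omega)]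
        have hdrop1 : a.drop (k + 1) = [] := by
          apply List.drop_eq_nil_of_le; omega
        rw [hdrop, hdrop1, Nat.sub_self, List.take_zero]
        simp only [attachRun_nil]
        simp only [rRuns, List.foldr_cons, List.foldr_nil]
        simp [rStep, attachRun]
      · have hk2 : k + 1 < a.length := by omega
        have hc1 : ((k : Int) == (a.length : Int) - 1) = false := by
          simp only [beq_eq_false_iff_ne]; omega
        have hxk1 : PySem.List.pyGetD a ((k : Int) + 1) 0 = a[k + 1] := by
          rw [hcast1, PySem.List.pyGetD_natCast]
          exact List.getD_eq_getElem a 0 hk2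
        have hdrop2 : a.drop (k + 1) = a[k + 1] :: a.drop (k + 2) :=
          List.drop_eq_getElem_cons hk2
        obtain ⟨t, gs', hrs⟩ := rStep_head (a[k + 1]) (rRuns (a.drop (k + 2)))
        have hr1 : rRuns (a.drop (k + 1)) = (a[k + 1] :: t) :: gs' := by
          rw [hdrop2]; exact hrs
        have hr0 : rRuns (a.drop k) = rStep a[k] (rRuns (a.drop (k + 1))) := by
          rw [hdrop]; rfl
        by_cases hd : a[k + 1] - a[k] = 1
        · -- consecutive: no boundary, state unchanged
          have hc2 : (PySem.List.pyGetD a ((k : Int) + 1) 0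
              - PySem.List.pyGetD a (k : Int) 0 != 1) = false := by
            rw [hxk, hxk1]; simp [hd]
          have hstep : vsStepA a c (sides, (curr : Int)) (k : Int) = (sides, (curr : Int)) := by
            unfold vsStepA
            rw [hc1, hc2, Bool.or_self, if_neg (by simp)]
          rw [hstep, hcast1]
          rw [ih (k + 1) curr _ (by omega) (by omega) (by omega)]
          congr 1
          rw [hptake, hr0, hr1]
          have hglue : rStep a[k] ((a[k + 1] :: t) :: gs')
              = (a[k] :: a[k + 1] :: t) :: gs' := by
            simp [rStep, hd]
          rw [hglue]
          simp [attachRun, List.append_assoc]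
        · -- boundary: emit, reset curr
          have hc2 : (PySem.List.pyGetD a ((k : Int) + 1) 0
              - PySem.List.pyGetD a (k : Int) 0 != 1) = true := by
            rw [hxk, hxk1]; simp [hd]
          have hstep : vsStepA a c (sides, (curr : Int)) (k : Int)
              = (keepStep c sides ((a.drop curr).take (k - curr) ++ [a[k]]), (k : Int) + 1) := by
            unfold vsStepA
            rw [hc1, hc2, Bool.false_or, if_pos rfl, ← hemit]
          rw [hstep, hcast1]
          rw [ih (k + 1) (k + 1) _ (by omega) (le_refl _) (by omega)]
          have hnoglue : rStep a[k] ((a[k + 1] :: t) :: gs')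
              = [a[k]] :: (a[k + 1] :: t) :: gs' := by
            simp [rStep, hd]
          rw [Nat.sub_self, List.take_zero, attachRun_nil, hr0, hr1, hnoglue]
          simp only [attachRun, List.foldl_cons]

-- A's dict-building step is mStep
lemma dictStep_eq :
    (fun (d : PySem.Dict Int (List Int)) (p : Int × Int) =>
        if d.contains p.2 then d.modify p.2 [] (fun a => a ++ [p.1])
        else d.insert p.2 [p.1])
      = mStep := by
  funext d p
  by_cases h : d.contains p.2
  · simp [mStep, h]
  · simp at h
    simp [mStep, h, PySem.Dict.modify, PySem.Dict.getD_of_not_contains (h := h)]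

-- per-column function of port A is canonStep
lemma column_eq (sides : List (List (Int × Int))) (cv : Int × List Int) :
    ((PySem.List.pyRange 0 ((PySem.List.sorted cv.2 (fun x => x) false).length : Int) 1).foldl
        (vsStepA (PySem.List.sorted cv.2 (fun x => x) false) cv.1) (sides, 0)).1
      = canonStep sides cv := by
  show ((PySem.List.pyRange ((0 : Nat) : Int)
      ((PySem.List.sorted cv.2 (fun x => x) false).length : Int) 1).foldl
        (vsStepA (PySem.List.sorted cv.2 (fun x => x) false) cv.1)
        (sides, ((0 : Nat) : Int))).1 = _
  rw [A_loop cv.1 _ (PySem.List.sorted cv.2 (fun x => x) false).length 0 0 sides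
      (by omega) (le_refl _) (by omega)]
  simp [canonStep, srt, attachRun_nil]

lemma A_canon (perimeter : List (Int × Int)) :
    findVerticalSides perimeter
      = (perimeter.foldl mStep PySem.Dict.empty).items.foldl canonStep [] := by
  unfold findVerticalSides
  rw [dictStep_eq]
  have hf : (fun (sides : List (List (Int × Int))) (cv : Int × List Int) =>
      let array := PySem.List.sorted cv.2 (fun x => x) false
      ((PySem.List.pyRange 0 (array.length : Int) 1).foldl (vsStepA array cv.1)
        (sides, 0)).1) = canonStep := by
    funext sides cv
    exact column_eq sides cv
  rw [hf]

-- ---------- dict invariants ----------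
lemma contains_iff {ν : Type} (d : PySem.Dict Int ν) (c : Int) :
    d.contains c = true ↔ c ∈ d.items.map Prod.fst := by
  simp [PySem.Dict.contains, List.any_eq_true, List.mem_map]

lemma mem_decomp {ν : Type} (c : Int) (L : List (Int × ν)) (h : c ∈ L.map Prod.fst) :
    ∃ L1 v L2, L = L1 ++ (c, v) :: L2 ∧ c ∉ L1.map Prod.fst := by
  induction L with
  | nil => simp at h
  | cons q L ih =>
    by_cases hq : q.1 = c
    · exact ⟨[], q.2, L, by simp [← hq], by simp⟩
    · have : c ∈ L.map Prod.fst := by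
        rcases (by simpa using h) with h1 | h1
        · exact absurd h1.symm hq
        · simpa using h1
      obtain ⟨L1, v, L2, he, hn⟩ := ih this
      refine ⟨q :: L1, v, L2, by simp [he], ?_⟩
      simp only [List.map_cons, List.mem_cons]
      rintro (h1 | h1)
      · exact hq h1.symm
      · exact hn h1

lemma map_keynotin (c : Int) (q : Int × List Int) (L : List (Int × List Int))
    (h : c ∉ L.map Prod.fst) :
    L.map (fun p => if (p.1 == c) = true then q else p) = L := by
  induction L with
  | nil => rfl
  | cons p L ih =>
    simp only [List.map_cons, List.mem_cons, List.map_cons] at *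
    rw [if_neg (by simp; intro he; exact h (Or.inl he.symm)), ih (fun hm => h (Or.inr hm))]

lemma mStep_items_mem (d : PySem.Dict Int (List Int)) (r c : Int)
    (hnd : (d.items.map Prod.fst).Nodup) (h : c ∈ d.items.map Prod.fst) :
    ∃ L1 v L2, d.items = L1 ++ (c, v) :: L2 ∧ c ∉ L1.map Prod.fst ∧ c ∉ L2.map Prod.fst ∧
      (mStep d (r, c)).items = L1 ++ (c, v ++ [r]) :: L2 := by
  obtain ⟨L1, v, L2, he, hn1⟩ := mem_decomp c d.items h
  have hnd' := hnd
  rw [he] at hnd'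
  simp only [List.map_append, List.map_cons] at hnd'
  have hn2 : c ∉ L2.map Prod.fst := by
    have := List.Nodup.of_append_right hnd'
    exact (List.nodup_cons.1 this).1
  refine ⟨L1, v, L2, he, hn1, hn2, ?_⟩
  have hfind : d.items.find? (fun p => p.1 == c) = some (c, v) := by
    rw [he, List.find?_append]
    have h1 : L1.find? (fun p => p.1 == c) = none := by
      rw [List.find?_eq_none]
      intro p hp
      simp only [Bool.not_eq_true, beq_eq_false_iff_ne, ne_eq]
      intro heq; exact hn1 (List.mem_map.2 ⟨p, hp, heq⟩)
    rw [h1]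
    simp
  have hg : d.getD c [] = v := by
    simp [PySem.Dict.getD, PySem.Dict.get?, hfind]
  have hc : d.contains c = true := (contains_iff d c).2 h
  show (PySem.Dict.insert _ _ _).items = _
  rw [PySem.Dict.insert, if_pos (by simp [hc])]
  simp only [hg, he, List.map_append, List.map_cons]
  rw [map_keynotin c _ L1 hn1]
  congr 1
  rw [if_pos (by simp), map_keynotin c _ L2 hn2]

lemma mStep_items_not_mem (d : PySem.Dict Int (List Int)) (r c : Int)
    (h : c ∉ d.items.map Prod.fst) :
    (mStep d (r, c)).items = d.items ++ [(c, [r])] := by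
  have hc : d.contains c = false := by
    rw [Bool.eq_false_iff]; intro hcc; exact h ((contains_iff d c).1 hcc)
  have hg : d.getD c [] = [] := by
    simp [PySem.Dict.getD, PySem.Dict.get?]
    rw [List.find?_eq_none.2]
    · rfl
    · intro p hp
      simp only [Bool.not_eq_true, beq_eq_false_iff_ne, ne_eq]
      intro he; exact h (List.mem_map.2 ⟨p, hp, he⟩)
  show (PySem.Dict.insert _ _ _).items = _
  rw [PySem.Dict.insert, if_neg (by simp [hc])]
  simp [hg]

lemma en_map_fst (n : Nat) (ks : List Int) : (en n ks).map Prod.fst = ks := by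
  induction ks generalizing n with
  | nil => rfl
  | cons k ks ih => simp [en, ih]

lemma en_length (n : Nat) (ks : List Int) : (en n ks).length = ks.length := by
  induction ks generalizing n with
  | nil => rfl
  | cons k ks ih => simp [en, ih]

lemma en_append (n : Nat) (ks : List Int) (c : Int) :
    en n (ks ++ [c]) = en n ks ++ [(c, ((n + ks.length : Nat) : Int))] := by
  induction ks generalizing n with
  | nil => simp [en]
  | cons k ks ih =>
    simp only [List.cons_append, en, ih]
    have : (n + (k :: ks).length : Nat) = ((n + 1) + ks.length : Nat) := by simp; omega
    rw [this]

-- the joint invariant of the two dict folds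
lemma build_main : ∀ (ps : List (Int × Int)) (d : PySem.Dict Int (List Int)) (o : PySem.Dict Int Int),
    (d.items.map Prod.fst).Nodup → o.items = en 0 (d.items.map Prod.fst) →
    ((((ps.foldl mStep d).items.map Prod.fst).Nodup)
      ∧ (ps.foldl oStep o).items = en 0 ((ps.foldl mStep d).items.map Prod.fst)
      ∧ (flatten ((ps.foldl mStep d).items)).Perm (flatten d.items ++ ps)) := by
  intro ps
  induction ps with
  | nil =>
    intro d o hnd ho
    exact ⟨hnd, ho, by simp⟩
  | cons p ps ih =>
    intro d o hnd ho
    obtain ⟨r, c⟩ := p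
    have hok : o.items.map Prod.fst = d.items.map Prod.fst := by
      rw [ho, en_map_fst]
    by_cases h : c ∈ d.items.map Prod.fst
    · -- existing column
      obtain ⟨L1, v, L2, he, hn1, hn2, hni⟩ := mStep_items_mem d r c hnd h
      have hkeys : (mStep d (r, c)).items.map Prod.fst = d.items.map Prod.fst := by
        rw [hni, he]; simp
      have hoc : oStep o (r, c) = o := by
        unfold oStep
        rw [if_pos ((contains_iff o c).2 (by rw [hok]; exact h))]
      have hstep : (flatten ((mStep d (r, c)).items)).Perm (flatten d.items ++ [(r, c)]) := by
        rw [hni, he]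
        unfold flatten
        simp only [List.flatMap_append, List.flatMap_cons, List.map_append, List.map_cons,
          List.map_nil, List.append_assoc]
        refine List.Perm.append_left _ ?_
        refine List.Perm.append_left _ ?_
        exact (List.perm_append_comm (l₁ := [(r, c)]) (l₂ := flatten L2)).trans
          (by simp [flatten])
      simp only [List.foldl_cons, hoc]
      obtain ⟨h1, h2, h3⟩ := ih (mStep d (r, c)) o (by rw [hkeys]; exact hnd)
        (by rw [hkeys]; exact ho)
      refine ⟨h1, h2, ?_⟩
      refine h3.trans ?_
      have := hstep.append_right ps
      simpa using this
    · -- new column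
      have hni := mStep_items_not_mem d r c h
      have hkeys : (mStep d (r, c)).items.map Prod.fst = d.items.map Prod.fst ++ [c] := by
        rw [hni]; simp
      have hoc : (oStep o (r, c)).items = o.items ++ [(c, (o.items.length : Int))] := by
        unfold oStep
        rw [if_neg (by
          intro hcc
          exact h (by rw [← hok]; exact (contains_iff o c).1 hcc))]
        rw [PySem.Dict.insert, if_neg (by
          intro hcc
          exact h (by rw [← hok]; exact (contains_iff o c).1 hcc))]
      have ho' : (oStep o (r, c)).items = en 0 ((mStep d (r, c)).items.map Prod.fst) := by
        rw [hoc, hkeys, en_append, ho]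
        have hel : (en 0 (List.map Prod.fst d.items)).length
            = (List.map Prod.fst d.items).length := en_length _ _
        rw [hel]
        norm_num
      have hnd' : ((mStep d (r, c)).items.map Prod.fst).Nodup := by
        rw [hkeys]
        refine List.Nodup.append hnd (by simp) ?_
        intro a ha hb
        simp only [List.mem_singleton] at hb
        subst hb
        exact h ha
      have hstep : (flatten ((mStep d (r, c)).items)).Perm (flatten d.items ++ [(r, c)]) := by
        rw [hni]
        unfold flatten
        simp
      simp only [List.foldl_cons]
      obtain ⟨h1, h2, h3⟩ := ih (mStep d (r, c)) (oStep o (r, c)) hnd' ho'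
      refine ⟨h1, h2, ?_⟩
      refine h3.trans ?_
      have := hstep.append_right ps
      simpa using this

-- ---------- the enumeration dict ranks keys by position ----------
lemma en_find (ks : List Int) (hnd : ks.Nodup) :
    ∀ (n i : Nat) (h : i < ks.length),
      (en n ks).find? (fun q => q.1 == ks[i]) = some (ks[i], ((n + i : Nat) : Int)) := by
  induction ks with
  | nil => intro n i h; simp at h
  | cons k ks ih =>
    intro n i h
    match i with
    | 0 =>
      simp only [List.getElem_cons_zero, en]
      rw [List.find?_cons_of_pos (by simp)]
      simp
    | j + 1 =>
      have hj : j < ks.length := by simpa using h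
      have hk : k ∉ ks := (List.nodup_cons.1 hnd).1
      have hne : k ≠ ks[j] := fun he => hk (he ▸ List.getElem_mem hj)
      simp only [List.getElem_cons_succ, en]
      rw [List.find?_cons_of_neg (by simp [hne])]
      rw [ih (List.Nodup.of_cons hnd) (n + 1) j hj]
      congr 2
      omega

lemma en_getD (ks : List Int) (hnd : ks.Nodup) (o : PySem.Dict Int Int)
    (ho : o.items = en 0 ks) (i : Nat) (h : i < ks.length) :
    o.getD ks[i] 0 = (i : Int) := by
  simp only [PySem.Dict.getD, PySem.Dict.get?, ho]
  rw [en_find ks hnd 0 i h]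
  simp

lemma rank_inj (ks : List Int) (hnd : ks.Nodup) (o : PySem.Dict Int Int)
    (ho : o.items = en 0 ks) (c1 c2 : Int) (h1 : c1 ∈ ks) (h2 : c2 ∈ ks)
    (he : o.getD c1 0 = o.getD c2 0) : c1 = c2 := by
  obtain ⟨i, hi, hci⟩ := List.mem_iff_getElem.1 h1
  obtain ⟨j, hj, hcj⟩ := List.mem_iff_getElem.1 h2
  subst hci hcj
  rw [en_getD ks hnd o ho i hi, en_getD ks hnd o ho j hj] at he
  have : i = j := by exact_mod_cast he
  subst this
  rfl

lemma rank_pairwise (L : List (Int × List Int)) (o : PySem.Dict Int Int)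
    (hnd : (L.map Prod.fst).Nodup) (ho : o.items = en 0 (L.map Prod.fst)) :
    (L.map (fun cv => o.getD cv.1 0)).Pairwise (· < ·) := by
  rw [List.pairwise_iff_getElem]
  intro i j hi hj hij
  simp only [List.length_map] at hi hj
  have hi' : i < (L.map Prod.fst).length := by simpa using hi
  have hj' : j < (L.map Prod.fst).length := by simpa using hj
  have e1 : (L.map (fun cv => o.getD cv.1 0))[i] = o.getD (L.map Prod.fst)[i] 0 := by
    simp
  have e2 : (L.map (fun cv => o.getD cv.1 0))[j] = o.getD (L.map Prod.fst)[j] 0 := by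
    simp
  rw [e1, e2, en_getD _ hnd o ho i hi', en_getD _ hnd o ho j hj']
  exact_mod_cast hij

-- ---------- the global sort equals the concatenation of sorted column blocks ----------
lemma insertBy_lex (k1 k2 : (Int × Int) → Int) (x : Int × Int) (ys : List (Int × Int))
    (h : ys.Pairwise (lexLe k1 k2)) :
    (PySem.List.insertBy
        (fun a b => decide (k1 a < k1 b) || (!decide (k1 b < k1 a) && decide (k2 a < k2 b)))
        x ys).Pairwise (lexLe k1 k2) := by
  induction ys with
  | nil => simp [PySem.List.insertBy]
  | cons y ys ih =>
    have hcons : PySem.List.insertBy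
        (fun a b => decide (k1 a < k1 b) || (!decide (k1 b < k1 a) && decide (k2 a < k2 b)))
        x (y :: ys)
      = if (decide (k1 x < k1 y) || (!decide (k1 y < k1 x) && decide (k2 x < k2 y))) = true
        then x :: y :: ys
        else y :: PySem.List.insertBy
          (fun a b => decide (k1 a < k1 b) || (!decide (k1 b < k1 a) && decide (k2 a < k2 b)))
          x ys := rfl
    rw [hcons]
    obtain ⟨hy, hys⟩ := List.pairwise_cons.1 h
    by_cases hb : (decide (k1 x < k1 y) || (!decide (k1 y < k1 x) && decide (k2 x < k2 y))) = true
    · rw [if_pos hb]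
      simp only [Bool.or_eq_true, Bool.and_eq_true, Bool.not_eq_eq_eq_not, Bool.not_true,
        decide_eq_true_eq, decide_eq_false_iff_not] at hb
      refine List.pairwise_cons.2 ⟨?_, h⟩
      intro z hz
      rcases List.mem_cons.1 hz with hz | hz
      · subst hz; unfold lexLe; omega
      · have := hy z hz
        unfold lexLe at this ⊢
        omega
    · rw [if_neg hb]
      simp only [Bool.or_eq_true, Bool.and_eq_true, Bool.not_eq_eq_eq_not, Bool.not_true,
        decide_eq_true_eq, decide_eq_false_iff_not, not_or, not_and] at hb
      refine List.pairwise_cons.2 ⟨?_, ih hys⟩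
      intro z hz
      rcases (PySem.List.mem_insertBy _ _ _ _).1 hz with hz | hz
      · subst hz; unfold lexLe; omega
      · exact hy z hz

lemma sorted2_pairwise (xs : List (Int × Int)) (k1 k2 : (Int × Int) → Int) :
    (PySem.List.sorted2 xs k1 k2 false).Pairwise (lexLe k1 k2) := by
  have aux : ∀ (l : List (Int × Int)) (acc : List (Int × Int)), acc.Pairwise (lexLe k1 k2) →
      (l.foldl (fun acc x => PySem.List.insertBy
          (fun a b => decide (k1 a < k1 b) || (!decide (k1 b < k1 a) && decide (k2 a < k2 b)))
          x acc) acc).Pairwise (lexLe k1 k2) := by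
    intro l
    induction l with
    | nil => intro acc h; exact h
    | cons x l ih =>
      intro acc h
      exact ih _ (insertBy_lex k1 k2 x acc h)
  exact aux xs [] (by simp)

lemma mem_blockOf (q : Int × Int) (cv : Int × List Int) (h : q ∈ blockOf cv) :
    q.2 = cv.1 ∧ q.1 ∈ cv.2 := by
  obtain ⟨r, hr, he⟩ := List.mem_map.1 h
  subst he
  exact ⟨rfl, (PySem.List.mem_sorted _ _ _ _).1 hr⟩

lemma mem_blocks (q : Int × Int) (L : List (Int × List Int)) (h : q ∈ blocks L) :
    ∃ cv ∈ L, q.2 = cv.1 ∧ q.1 ∈ cv.2 := by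
  obtain ⟨cv, hcv, hq⟩ := List.mem_flatMap.1 h
  exact ⟨cv, hcv, mem_blockOf q cv hq⟩

lemma blocks_pairwise (o : PySem.Dict Int Int) (L : List (Int × List Int))
    (hrk : (L.map (fun cv => o.getD cv.1 0)).Pairwise (· < ·)) :
    (blocks L).Pairwise (lexLe (fun p => o.getD p.2 0) (fun p => p.1)) := by
  induction L with
  | nil => simp [blocks]
  | cons cv L ih =>
    simp only [List.map_cons] at hrk
    obtain ⟨hd, htl⟩ := List.pairwise_cons.1 hrk
    show (blockOf cv ++ blocks L).Pairwise _
    refine List.pairwise_append.2 ⟨?_, ih htl, ?_⟩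
    · unfold blockOf
      refine (List.pairwise_map).2 ?_
      have := PySem.List.sorted_pairwise cv.2 (fun x => x) 
      refine this.imp ?_
      intro a b hab
      exact Or.inr ⟨rfl, hab⟩
    · intro a ha b hb
      obtain ⟨ha2, -⟩ := mem_blockOf a cv ha
      obtain ⟨cv', hcv', hb2, -⟩ := mem_blocks b L hb
      refine Or.inl ?_
      show o.getD a.2 0 < o.getD b.2 0
      rw [ha2, hb2]
      exact hd _ (List.mem_map.2 ⟨cv', hcv', rfl⟩)

lemma blocks_perm_flatten (L : List (Int × List Int)) : (blocks L).Perm (flatten L) := by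
  induction L with
  | nil => rfl
  | cons cv L ih =>
    show (blockOf cv ++ blocks L).Perm (cv.2.map (fun r => (r, cv.1)) ++ flatten L)
    exact List.Perm.append ((PySem.List.sorted_perm cv.2 (fun x => x) false).map _) ih

lemma mem_flatten (q : Int × Int) (L : List (Int × List Int)) (h : q ∈ flatten L) :
    ∃ cv ∈ L, q.2 = cv.1 := by
  obtain ⟨cv, hcv, hq⟩ := List.mem_flatMap.1 h
  obtain ⟨r, -, he⟩ := List.mem_map.1 hq
  exact ⟨cv, hcv, by rw [← he]⟩

lemma sorted_eq_blocks (perimeter : List (Int × Int)) :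
    PySem.List.sorted2 perimeter
        (fun p => (perimeter.foldl oStep PySem.Dict.empty).getD p.2 0) (fun p => p.1) false
      = blocks (perimeter.foldl mStep PySem.Dict.empty).items := by
  obtain ⟨hnd, ho, hperm⟩ := build_main perimeter PySem.Dict.empty PySem.Dict.empty
    (by simp [PySem.Dict.empty]) (by simp [PySem.Dict.empty]; rfl)
  have hperm' : (flatten (perimeter.foldl mStep PySem.Dict.empty).items).Perm perimeter := by
    simpa [flatten, PySem.Dict.empty] using hperm
  set O := perimeter.foldl oStep PySem.Dict.empty with hO
  set G := perimeter.foldl mStep PySem.Dict.empty with hG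
  have hmemcol : ∀ q ∈ perimeter, q.2 ∈ G.items.map Prod.fst := by
    intro q hq
    obtain ⟨cv, hcv, he⟩ := mem_flatten q G.items (hperm'.mem_iff.2 hq)
    exact List.mem_map.2 ⟨cv, hcv, he.symm⟩
  refine List.Perm.eq_of_pairwise ?_ (sorted2_pairwise _ _ _)
    (blocks_pairwise O G.items (rank_pairwise G.items O hnd ho)) ?_
  · intro a b ha hb hab hba
    have ha' : a ∈ perimeter :=
      (PySem.List.sorted2_perm perimeter _ _ false).mem_iff.1 ha
    have hb' : b ∈ perimeter :=
      hperm'.mem_iff.1 ((blocks_perm_flatten G.items).mem_iff.1 hb)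
    simp only [lexLe] at hab hba
    have hk1 : O.getD a.2 0 = O.getD b.2 0 := by omega
    have hk2 : a.1 = b.1 := by omega
    have hcc : a.2 = b.2 :=
      rank_inj (G.items.map Prod.fst) hnd O ho a.2 b.2
        (hmemcol a ha') (hmemcol b hb') hk1
    exact Prod.ext hk2 hcc
  · exact (PySem.List.sorted2_perm perimeter _ _ false).trans
      (hperm'.symm.trans (blocks_perm_flatten G.items).symm)

-- ---------- the scan over the blocks equals the canonical per-column fold ----------
lemma bStep_empty (s : List (List (Int × Int))) (pt : Int × Int) :
    bStep (s, []) pt = (s, [pt]) := by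
  simp [bStep]

lemma map_run_getLastD (ρ : List Int) (c : Int) (h : ρ ≠ []) :
    (ρ.map (fun r => (r, c))).getLastD (0, 0) = (ρ.getLastD 0, c) := by
  cases hq : ρ.getLast? with
  | none => exact absurd (List.getLast?_eq_none_iff.1 hq) h
  | some x =>
    rw [List.getLastD_eq_getLast?, List.getLastD_eq_getLast?, List.getLast?_map, hq]
    rfl

lemma bStep_same (s : List (List (Int × Int))) (ρ : List Int) (c x : Int)
    (hne : ρ ≠ []) (hstep : x - ρ.getLastD 0 = 1) :
    bStep (s, ρ.map (fun r => (r, c))) (x, c) = (s, (ρ ++ [x]).map (fun r => (r, c))) := by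
  unfold bStep
  dsimp only
  rw [map_run_getLastD ρ c hne]
  rw [List.getLastD_eq_getLast?] at hstep
  simp [hne, hstep]

lemma bStep_flush (s : List (List (Int × Int))) (ρ : List Int) (c x c' : Int)
    (hne : ρ ≠ []) (h : c ≠ c' ∨ ¬ x - ρ.getLastD 0 = 1) :
    bStep (s, ρ.map (fun r => (r, c))) (x, c') = (keepStep c s ρ, [(x, c')]) := by
  unfold bStep
  dsimp only
  rw [map_run_getLastD ρ c hne]
  have hcf : (!(ρ.map (fun r => (r, c))).isEmpty && (ρ.getLastD 0, c).2 == (x, c').2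
      && ((x, c').1 - (ρ.getLastD 0, c).1 == 1)) = false := by
    rcases h with h | h
    · simp [h]
    · rw [List.getLastD_eq_getLast?] at h
      simp [h]
  rw [hcf]
  simp only [Bool.false_eq_true, if_false, List.length_map]
  unfold keepStep
  split_ifs <;> rfl

lemma blockInv (c : Int) : ∀ (a ρ : List Int) (s : List (List (Int × Int))), ρ ≠ [] →
    ∃ ρ₁ s₁, ρ₁ ≠ []
      ∧ (a.map (fun r => (r, c))).foldl bStep (s, ρ.map (fun r => (r, c)))
          = (s₁, ρ₁.map (fun r => (r, c)))
      ∧ keepStep c s₁ ρ₁ = (attachGlue ρ (rRuns a)).foldl (keepStep c) s := by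
  intro a
  induction a with
  | nil =>
    intro ρ s hne
    refine ⟨ρ, s, hne, by simp, ?_⟩
    have : attachGlue ρ (rRuns []) = [ρ] := by
      simp only [rRuns, List.foldr_nil]
      unfold attachGlue
      simp [List.isEmpty_eq_false_iff.2 hne]
    rw [this]
    simp
  | cons x t ih =>
    intro ρ s hne
    have hEmpF : ρ.isEmpty = false := List.isEmpty_eq_false_iff.2 hne
    have hlast : ρ.getLastD 0 = ρ.getLast?.getD 0 := by
      rw [List.getLastD_eq_getLast?]
    by_cases hd : x - ρ.getLastD 0 = 1
    · -- the run continues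
      obtain ⟨ρ₁, s₁, h1, h2, h3⟩ := ih (ρ ++ [x]) s (by simp)
      refine ⟨ρ₁, s₁, h1, ?_, ?_⟩
      · simp only [List.map_cons, List.foldl_cons, bStep_same s ρ c x hne hd]
        exact h2
      · rw [h3]
        congr 1
        rw [attachGlue_glue ρ x _ hEmpF (by rw [← hlast]; exact hd)]
        rfl
    · -- boundary: flush
      obtain ⟨ρ₁, s₁, h1, h2, h3⟩ := ih [x] (keepStep c s ρ) (by simp)
      refine ⟨ρ₁, s₁, h1, ?_, ?_⟩
      · simp only [List.map_cons, List.foldl_cons,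
          bStep_flush s ρ c x c hne (Or.inr hd)]
        exact h2
      · rw [h3, attachGlue_single]
        have : attachGlue ρ (rRuns (x :: t)) = ρ :: rStep x (rRuns t) := by
          rw [show rRuns (x :: t) = rStep x (rRuns t) from rfl] at *
          exact attachGlue_noglue ρ x _ hEmpF (by rw [← hlast]; exact hd)
        rw [this]
        simp

lemma master : ∀ (L : List (Int × List Int)) (sides : List (List (Int × Int)))
    (ρ : List Int) (c : Int),
    (L.map Prod.fst).Nodup → (ρ ≠ [] → c ∉ L.map Prod.fst) →
    (letI st := (blocks L).foldl bStep (sides, ρ.map (fun r => (r, c)))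
     if st.2.length > 1 then st.1 ++ [st.2] else st.1)
      = L.foldl canonStep (keepStep c sides ρ) := by
  intro L
  induction L with
  | nil =>
    intro sides ρ c _ _
    show (if (ρ.map (fun r => (r, c))).length > 1
        then sides ++ [ρ.map (fun r => (r, c))] else sides) = keepStep c sides ρ
    simp only [List.length_map]
    unfold keepStep
    split_ifs <;> rfl
  | cons cv L ih =>
    intro sides ρ c hnd hin
    have hnd2 : (cv.1 :: L.map Prod.fst).Nodup := by
      rw [List.map_cons] at hnd; exact hnd
    have hc' : cv.1 ∉ L.map Prod.fst := (List.nodup_cons.1 hnd2).1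
    have hnd' : (L.map Prod.fst).Nodup := (List.nodup_cons.1 hnd2).2
    have hsplit : blocks (cv :: L) = blockOf cv ++ blocks L := by
      simp [blocks]
    cases ha : srt cv.2 with
    | nil =>
      have hb0 : blockOf cv = [] := by simp [blockOf, ha]
      have hcanon : canonStep (keepStep c sides ρ) cv = keepStep c sides ρ := by
        simp [canonStep, ha, rRuns]
      rw [List.foldl_cons, hcanon]
      have := ih sides ρ c hnd' (fun hρ => fun hm => hin hρ (by simp [hm]))
      rw [← this]
      rw [hsplit, hb0, List.nil_append]
    | cons x t =>
      have hfirst : bStep (sides, ρ.map (fun r => (r, c))) (x, cv.1)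
          = (keepStep c sides ρ, [(x, cv.1)]) := by
        by_cases hρ : ρ = []
        · subst hρ
          simp only [List.map_nil]
          rw [bStep_empty]
          simp [keepStep]
        · refine bStep_flush sides ρ c x cv.1 hρ (Or.inl ?_)
          intro he
          exact hin hρ (by simp [he])
      obtain ⟨ρ₁, s₁, h1, h2, h3⟩ := blockInv cv.1 t [x] (keepStep c sides ρ) (by simp)
      have hblock : (blockOf cv).foldl bStep (sides, ρ.map (fun r => (r, c)))
          = (s₁, ρ₁.map (fun r => (r, cv.1))) := by
        unfold blockOf
        rw [ha, List.map_cons, List.foldl_cons, hfirst]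
        have : [(x, cv.1)] = [x].map (fun r => (r, cv.1)) := rfl
        rw [this]
        exact h2
      have hrest := ih s₁ ρ₁ cv.1 hnd' (fun _ => hc')
      show (letI st := (blocks (cv :: L)).foldl bStep (sides, ρ.map (fun r => (r, c)))
        if st.2.length > 1 then st.1 ++ [st.2] else st.1) = _
      rw [hsplit, List.foldl_append, hblock]
      rw [hrest]
      have hcan : canonStep (keepStep c sides ρ) cv
          = (rStep x (rRuns t)).foldl (keepStep cv.1) (keepStep c sides ρ) := by
        unfold canonStep
        rw [ha]
        rfl
      rw [List.foldl_cons, hcan, h3, attachGlue_single]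

-- ===== VERDICT (by name: the statement is the Claim_ definition above) =====
theorem findVerticalSides_spec : Claim_equal_findVerticalSides := by
  intro perimeter _
  unfold Spec_findVerticalSides
  obtain ⟨hnd, ho, -⟩ := build_main perimeter PySem.Dict.empty PySem.Dict.empty
    (by simp [PySem.Dict.empty]) (by simp [PySem.Dict.empty]; rfl)
  rw [A_canon]
  show _ = findVerticalSides_alt perimeter
  have hB : findVerticalSides_alt perimeter
      = (letI st := (PySem.List.sorted2 perimeter
            (fun p => (perimeter.foldl oStep PySem.Dict.empty).getD p.2 0)
            (fun p => p.1) false).foldl bStep (([] : List (List (Int × Int))), ([] : List (Int × Int)))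
         if st.2.length > 1 then st.1 ++ [st.2] else st.1) := rfl
  rw [hB, sorted_eq_blocks]
  have := master (perimeter.foldl mStep PySem.Dict.empty).items [] [] 0 hnd (by simp)
  simp only [List.map_nil] at this
  rw [this]
  simp [keepStep]
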